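-- pv_equiv track=rewrite | github.com/linuschoudhury/codetree | 250205/함수를 이용한 369 게임/369-games-using-functions.py | multiples
-- ===== SOURCE A (Python) =====
-- def multiples(x,y):
--     cnt=0
--     arr=[]
--     for i in range(x,y+1):
--         if i%3==0:
--             cnt+=1
--             arr.append(i)
--         elif '3' in str(i) or '6' in str(i) or '9' in str(i):
--             cnt+=1
--             arr.append(i)
--     return cnt
-- ===== SOURCE B (Python) =====
-- def multiples(x, y):
--     if x > y:
--         return 0
--     # multiples of 3 counted in closed form; the loop only counts the rest
--     cnt = y // 3 - (x - 1) // 3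
--     for i in range(x, y + 1):
--         if i % 3 != 0 and any(d in '369' for d in str(i)):
--             cnt += 1
--     return cnt
-- ===== Notes on version B (the rewrite author's own statement) =====
-- stated objective: alternative
-- what changed: B counts the multiples of 3 in [x,y] with a closed-form floor-division formula instead of testing each element, and the remaining loop counts only non-multiples whose decimal digits meet the 3/6/9 test via a single any() over the digits instead of three separate substring searches.
import Mathlib
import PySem

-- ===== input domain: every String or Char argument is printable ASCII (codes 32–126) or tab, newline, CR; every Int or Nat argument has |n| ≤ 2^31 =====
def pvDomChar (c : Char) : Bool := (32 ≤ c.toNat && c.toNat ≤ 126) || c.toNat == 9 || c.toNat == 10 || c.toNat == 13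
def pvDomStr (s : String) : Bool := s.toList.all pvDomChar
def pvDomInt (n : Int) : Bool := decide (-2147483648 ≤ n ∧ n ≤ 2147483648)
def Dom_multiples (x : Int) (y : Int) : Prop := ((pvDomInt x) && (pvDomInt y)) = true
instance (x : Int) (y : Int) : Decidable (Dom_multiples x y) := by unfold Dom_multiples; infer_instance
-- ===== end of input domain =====

-- B replaces A's per-element counting of multiples of 3 by a closed-form floor-division count
-- and tests the 3/6/9-digit condition arithmetically over the digits of str(i) (objective: alternative).

-- ===== PORT A =====
def multiples (x : Int) (y : Int) : Int :=
  let r := (PySem.List.pyRange x (y + 1) 1).foldl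
    (fun (st : Int × List Int) i =>
      if PySem.Int.mod i 3 == 0 then (st.1 + 1, st.2 ++ [i])
      else if PySem.Str.isIn "3" (PySem.Int.toStr i) || PySem.Str.isIn "6" (PySem.Int.toStr i)
              || PySem.Str.isIn "9" (PySem.Int.toStr i) then (st.1 + 1, st.2 ++ [i])
      else st)
    ((0 : Int), ([] : List Int))
  r.1

-- ===== PORT B =====
def multiples_alt (x : Int) (y : Int) : Int :=
  if x > y then 0
  else
    (PySem.List.pyRange x (y + 1) 1).foldl
      (fun cnt i =>
        if (PySem.Int.mod i 3 != 0)
            && (PySem.Int.toChars i).any (fun d => PySem.Chars.isIn [d] "369".toList)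
        then cnt + 1 else cnt)
      (PySem.Int.floordiv y 3 - PySem.Int.floordiv (x - 1) 3)

-- ===== PRECONDITION & SPEC =====
def Spec_multiples (x : Int) (y : Int) (out : Int) : Prop := out = multiples_alt x y
instance (x : Int) (y : Int) (out : Int) : Decidable (Spec_multiples x y out) := by unfold Spec_multiples; infer_instance

-- ===== CLAIM (what is proved, stated in full; the proofs are below) =====
def Claim_equal_multiples : Prop := ∀ (x : Int) (y : Int), Dom_multiples x y → Spec_multiples x y (multiples x y)

-- ===== LEMMAS AND PROOFS =====

-- A's combined test, A's divisibility test, and B's loop test, as Booleans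
def pvA (i : Int) : Bool :=
  (PySem.Int.mod i 3 == 0) || (PySem.Str.isIn "3" (PySem.Int.toStr i) || PySem.Str.isIn "6" (PySem.Int.toStr i)
    || PySem.Str.isIn "9" (PySem.Int.toStr i))

def pvM3 (i : Int) : Bool := PySem.Int.mod i 3 == 0

def pvB (i : Int) : Bool :=
  (PySem.Int.mod i 3 != 0) && (PySem.Int.toChars i).any (fun d => PySem.Chars.isIn [d] "369".toList)

theorem pv_singleton_infix {a : Char} {l : List Char} : [a] <:+: l ↔ a ∈ l := by
  constructor
  · intro h; exact List.singleton_sublist.mp h.sublist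
  · intro h
    obtain ⟨s, t, rfl⟩ := List.append_of_mem h
    exact ⟨s, t, by simp⟩

theorem pv_char_isIn (c : Char) (lit : String) (hl : lit.toList = [c]) (i : Int) :
    PySem.Str.isIn lit (PySem.Int.toStr i) = true ↔ c ∈ PySem.Int.toChars i := by
  rw [PySem.Str.isIn_iff_infix, hl, PySem.Int.toList_toStr]
  exact pv_singleton_infix

theorem pv_digit_eq (i : Int) :
    (PySem.Str.isIn "3" (PySem.Int.toStr i) || PySem.Str.isIn "6" (PySem.Int.toStr i)
      || PySem.Str.isIn "9" (PySem.Int.toStr i))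
      = (PySem.Int.toChars i).any (fun d => PySem.Chars.isIn [d] "369".toList) := by
  rw [Bool.eq_iff_iff]
  simp only [Bool.or_eq_true, List.any_eq_true]
  constructor
  · rintro ((h | h) | h)
    · exact ⟨'3', (pv_char_isIn '3' "3" (by decide) i).mp h, by decide⟩
    · exact ⟨'6', (pv_char_isIn '6' "6" (by decide) i).mp h, by decide⟩
    · exact ⟨'9', (pv_char_isIn '9' "9" (by decide) i).mp h, by decide⟩
  · rintro ⟨d, hd, hin⟩
    have hmem : d ∈ ("369".toList) := pv_singleton_infix.mp ((PySem.Chars.isIn_iff_infix _ _).mp hin)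
    have : d = '3' ∨ d = '6' ∨ d = '9' := by simpa using hmem
    rcases this with rfl | rfl | rfl
    · exact Or.inl (Or.inl ((pv_char_isIn '3' "3" (by decide) i).mpr hd))
    · exact Or.inl (Or.inr ((pv_char_isIn '6' "6" (by decide) i).mpr hd))
    · exact Or.inr ((pv_char_isIn '9' "9" (by decide) i).mpr hd)

theorem pv_mod_beq (i : Int) : (PySem.Int.mod i 3 == 0) = decide (3 ∣ i) := by
  by_cases hd : (3 : Int) ∣ i
  · simp [hd, (PySem.Int.mod_eq_zero_iff_dvd i 3).mpr hd]
  · have hne : PySem.Int.mod i 3 ≠ 0 := fun hh => hd ((PySem.Int.mod_eq_zero_iff_dvd i 3).mp hh)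
    simp [hd, hne]

theorem pv_mod_bne (i : Int) : (PySem.Int.mod i 3 != 0) = !decide (3 ∣ i) := by
  show (!(PySem.Int.mod i 3 == 0)) = _
  rw [pv_mod_beq]

theorem pv_point (i : Int) :
    (if pvA i then (1 : Int) else 0) = (if pvM3 i then 1 else 0) + (if pvB i then 1 else 0) := by
  unfold pvA pvM3 pvB
  rw [pv_digit_eq i, pv_mod_beq, pv_mod_bne]
  by_cases hd3 : 3 ∣ i <;>
    cases h2 : (PySem.Int.toChars i).any (fun d => PySem.Chars.isIn [d] "369".toList) <;>
      simp [hd3]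

theorem pv_countP_split (L : List Int) :
    ((L.countP pvA : Int)) = (L.countP pvM3 : Int) + (L.countP pvB : Int) := by
  induction L with
  | nil => simp
  | cons a L ih =>
    simp only [List.countP_cons]
    push_cast
    have := pv_point a
    by_cases hA : pvA a = true <;> by_cases hM : pvM3 a = true <;> by_cases hB : pvB a = true <;>
      simp only [hA, hM, hB, Bool.false_eq_true, if_true, if_false] at this ⊢ <;> omega

theorem pv_foldA (L : List Int) (cnt : Int) (arr : List Int) :
    (L.foldl
      (fun (st : Int × List Int) i =>
        if PySem.Int.mod i 3 == 0 then (st.1 + 1, st.2 ++ [i])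
        else if PySem.Str.isIn "3" (PySem.Int.toStr i) || PySem.Str.isIn "6" (PySem.Int.toStr i)
                || PySem.Str.isIn "9" (PySem.Int.toStr i) then (st.1 + 1, st.2 ++ [i])
        else st)
      (cnt, arr)).1 = cnt + (L.countP pvA : Int) := by
  induction L generalizing cnt arr with
  | nil => simp
  | cons a L ih =>
    simp only [List.foldl_cons, List.countP_cons]
    by_cases h1 : (PySem.Int.mod a 3 == 0) = true
    · have hA : pvA a = true := by unfold pvA; rw [h1, Bool.true_or]
      rw [if_pos h1, ih, hA, if_pos rfl]
      push_cast; ring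
    · rw [if_neg h1]
      by_cases h2 : (PySem.Str.isIn "3" (PySem.Int.toStr a) || PySem.Str.isIn "6" (PySem.Int.toStr a)
          || PySem.Str.isIn "9" (PySem.Int.toStr a)) = true
      · have hA : pvA a = true := by unfold pvA; rw [h2, Bool.or_true]
        rw [if_pos h2, ih, hA, if_pos rfl]
        push_cast; ring
      · simp only [Bool.not_eq_true] at h1 h2
        have hA : pvA a = false := by unfold pvA; rw [h1, h2]; rfl
        rw [if_neg (by rw [h2]; exact Bool.false_ne_true), ih, hA, if_neg (by simp)]
        push_cast; ring

theorem pv_count3 (n : Nat) (a : Int) :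
    ((PySem.List.pyRange a (a + n) 1).countP pvM3 : Int)
      = PySem.Int.floordiv (a + n - 1) 3 - PySem.Int.floordiv (a - 1) 3 := by
  induction n generalizing a with
  | zero =>
    rw [PySem.List.pyRange_one_eq_nil (by omega)]
    simp
  | succ n ih =>
    have hb : a + (((n : Nat) + 1 : Nat) : Int) = a + 1 + ((n : Nat) : Int) := by push_cast; ring
    rw [hb, PySem.List.pyRange_one_cons (by omega)]
    simp only [List.countP_cons]
    have hih := ih (a + 1)
    rw [PySem.Int.floordiv_eq_ediv_of_pos (by norm_num : (0:Int) < 3)] at hih ⊢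
    rw [PySem.Int.floordiv_eq_ediv_of_pos (by norm_num : (0:Int) < 3)] at hih ⊢
    have hpa : pvM3 a = decide ((3 : Int) ∣ a) := pv_mod_beq a
    rw [hpa]
    by_cases h : (3 : Int) ∣ a
    · rw [if_pos (by simp [h])]
      push_cast at hih ⊢; omega
    · rw [if_neg (by simp [h])]
      push_cast at hih ⊢; omega

theorem pv_foldB (L : List Int) (c : Int) :
    (L.foldl
      (fun cnt i =>
        if (PySem.Int.mod i 3 != 0)
            && (PySem.Int.toChars i).any (fun d => PySem.Chars.isIn [d] "369".toList)
        then cnt + 1 else cnt) c) = c + (L.countP pvB : Int) :=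
  PySem.List.foldl_if_add_one _ _ _

-- ===== VERDICT (by name: the statement is the Claim_ definition above) =====
theorem multiples_spec : Claim_equal_multiples := by
  intro x y _
  unfold Spec_multiples multiples multiples_alt
  by_cases hxy : x > y
  · rw [PySem.List.pyRange_one_eq_nil (by omega)]
    simp [hxy]
  · simp only [hxy, if_false]
    rw [pv_foldA, pv_foldB, pv_countP_split]
    have hn : y + 1 = x + ((y + 1 - x).toNat : Int) := by omega
    rw [hn, pv_count3]
    have h2 : x + ((y + 1 - x).toNat : Int) - 1 = y := by omega
    rw [h2]
    ring
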